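-- pv_equiv track=rewrite | github.com/olliklee/AoC | AoC_2017/Day09-Stream Processing-(--)/Day09.py | remove_exclamations
-- ===== SOURCE A (Python) =====
-- def remove_exclamations(line):
--     new_line = []
--     i = 0
--     while i < len(line):
--         if line[i] == '!':
--             i += 2
--         else:
--             new_line.append(line[i])
--             i += 1
--     return new_line
-- ===== SOURCE B (Python) =====
-- import re
--
-- def remove_exclamations(line):
--     return list(re.sub(r'!.?', '', line, flags=re.DOTALL))
-- ===== Notes on version B (the rewrite author's own statement) =====
-- stated objective: idiomatic
-- what changed: Replace the manual while loop with index arithmetic by a single regex substitution (pattern bang followed by an optional any-char under DOTALL replaced by the empty string) over the whole line, then list the cleaned string; the substitution runs in the C regex engine instead of bytecode per character.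
import Mathlib
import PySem

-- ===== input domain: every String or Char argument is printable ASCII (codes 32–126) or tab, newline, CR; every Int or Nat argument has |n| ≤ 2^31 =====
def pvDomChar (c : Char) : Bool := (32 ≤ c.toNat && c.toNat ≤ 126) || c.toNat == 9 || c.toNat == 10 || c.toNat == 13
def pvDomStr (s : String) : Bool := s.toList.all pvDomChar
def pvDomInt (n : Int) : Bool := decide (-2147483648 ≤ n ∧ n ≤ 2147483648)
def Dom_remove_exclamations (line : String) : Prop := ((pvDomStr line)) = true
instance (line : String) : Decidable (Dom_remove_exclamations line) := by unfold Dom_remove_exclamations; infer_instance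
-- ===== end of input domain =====

-- B replaces A's index-arithmetic while loop by one regex substitution re.sub(r'!.?', '', line, re.DOTALL) followed by list(); idiomatic, no speed claim.
-- ===== PORT A =====
-- while i < len(line): if line[i]=='!' then i+=2 else append line[i]; i+=1
def pvALoop (cs : List Char) (i : Nat) (acc : List String) : List String :=
  if h : i < cs.length then
    if cs[i] = '!' then pvALoop cs (i + 2) acc
    else pvALoop cs (i + 1) (acc ++ [String.mk [cs[i]]])
  else acc
termination_by cs.length - i

def remove_exclamations (line : String) : List String :=
  pvALoop line.toList 0 []

-- ===== PORT B =====
-- Hand port of re.sub(r'!.?', '', line, flags=re.DOTALL): the regex engine scans left to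
-- right; at a '!' the pattern matches (consuming the '!' and, if present, the next char,
-- '.' matching any char under DOTALL) and the match is replaced by ''; at any other char
-- there is no match and the char is kept. Exact for this pattern on all inputs.
def pvReSub : List Char → List Char
  | [] => []
  | c :: rest =>
    if c = '!' then pvReSub (rest.drop 1)
    else c :: pvReSub rest
termination_by cs => cs.length
decreasing_by
  · simp only [List.length_drop, List.length_cons]; omega
  · simp only [List.length_cons]; omega

-- list(cleaned): each char of the cleaned string becomes a one-char string
def remove_exclamations_alt (line : String) : List String :=
  (pvReSub line.toList).map (fun c => String.mk [c])

-- ===== PRECONDITION & SPEC =====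
def Spec_remove_exclamations (line : String) (out : List String) : Prop := out = remove_exclamations_alt line
instance (line : String) (out : List String) : Decidable (Spec_remove_exclamations line out) := by unfold Spec_remove_exclamations; infer_instance

-- ===== CLAIM (what is proved, stated in full; the proofs are below) =====
def Claim_equal_remove_exclamations : Prop := ∀ (line : String), Dom_remove_exclamations line → Spec_remove_exclamations line (remove_exclamations line)

-- ===== LEMMAS AND PROOFS =====

lemma pvALoop_eq (cs : List Char) (i : Nat) (acc : List String) :
    pvALoop cs i acc = acc ++ (pvReSub (cs.drop i)).map (fun c => String.mk [c]) := by
  by_cases h : i < cs.length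
  · rw [pvALoop]
    have hd : cs.drop i = cs[i] :: cs.drop (i + 1) := List.drop_eq_getElem_cons h
    by_cases he : cs[i] = '!'
    · simp only [h, he, if_true, dif_pos]
      rw [pvALoop_eq cs (i + 2) acc, hd, pvReSub]
      have h2 : List.drop 1 (List.drop (i + 1) cs) = List.drop (i + 2) cs := by
        rw [List.drop_drop]
      simp [he, h2]
    · simp only [h, he, if_false, dif_pos]
      rw [pvALoop_eq cs (i + 1) (acc ++ [String.mk [cs[i]]]), hd, pvReSub]
      simp [he]
  · rw [pvALoop]
    simp only [h, dif_neg, not_false_iff]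
    rw [List.drop_eq_nil_of_le (by omega), pvReSub]
    simp
termination_by cs.length - i

-- ===== VERDICT =====
theorem remove_exclamations_spec : Claim_equal_remove_exclamations := by
  intro line _
  unfold Spec_remove_exclamations remove_exclamations remove_exclamations_alt
  simpa using pvALoop_eq line.toList 0 []
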